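-- pv_equiv track=rewrite | github.com/pypi-data/pypi-mirror-76 | packages/hippo-diabetes/hippo_diabetes-1.0.0.tar.gz/hippo_diabetes-1.0.0/otter/OtterCareGapMedOptTransformer.py | antiDiabeticListUpdate
-- ===== SOURCE A (Python) =====
-- def antiDiabeticListUpdate(drugList,requiredDrug):
--     """return the updated antidiabetic drug list and updated drug pdc list with required drug removed
--
--     Parameters
--     :param drugList: the whole drug list of antidiabtics
--     :type drugList: list
--     :param requiredDrug: drug list of the prerequisite antidiabetic drug list per this care gap
--     :type requiredDrug: list
--     """
--
--     drugPDCList = []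
--     # save a copy
--     drugListCopy = drugList.copy()
--     for i in drugListCopy:
--         # get the drug pdc name based on drug name
--         pdc = '_'.join(i.split('_')[:-3]) + '_pdc_' + '_'.join(i.split('_')[-3:])
--         drugPDCList.append(pdc)
--     # no required antidiabetic drug
--     if not requiredDrug:
--         return drugListCopy, drugPDCList
--     else:
--         # update the drug and pdc list with removing requied one
--         for i in requiredDrug:
--             drugListCopy.remove(i)
--             pdc = '_'.join(i.split('_')[:-3]) + '_pdc_' + '_'.join(i.split('_')[-3:])
--             drugPDCList.remove(pdc)
--         return drugListCopy, drugPDCList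
-- ===== SOURCE B (Python) =====
-- def _pdc(name):
--     parts = name.split('_')
--     return '_'.join(parts[:-3]) + '_pdc_' + '_'.join(parts[-3:])
--
--
-- def antiDiabeticListUpdate(drugList, requiredDrug):
--     """Remove the required drugs first, then derive the pdc list from the result."""
--     remaining = drugList.copy()
--     for i in requiredDrug:
--         remaining.remove(i)
--     return remaining, [_pdc(d) for d in remaining]
-- ===== Notes on version B (the rewrite author's own statement) =====
-- stated objective: simpler
-- what changed: B drops A's up-front pdc list and its parallel per-iteration pdc .remove: it runs only the drug-removal loop over requiredDrug and then derives the pdc list in one pass from the final drug list.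
import Mathlib
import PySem

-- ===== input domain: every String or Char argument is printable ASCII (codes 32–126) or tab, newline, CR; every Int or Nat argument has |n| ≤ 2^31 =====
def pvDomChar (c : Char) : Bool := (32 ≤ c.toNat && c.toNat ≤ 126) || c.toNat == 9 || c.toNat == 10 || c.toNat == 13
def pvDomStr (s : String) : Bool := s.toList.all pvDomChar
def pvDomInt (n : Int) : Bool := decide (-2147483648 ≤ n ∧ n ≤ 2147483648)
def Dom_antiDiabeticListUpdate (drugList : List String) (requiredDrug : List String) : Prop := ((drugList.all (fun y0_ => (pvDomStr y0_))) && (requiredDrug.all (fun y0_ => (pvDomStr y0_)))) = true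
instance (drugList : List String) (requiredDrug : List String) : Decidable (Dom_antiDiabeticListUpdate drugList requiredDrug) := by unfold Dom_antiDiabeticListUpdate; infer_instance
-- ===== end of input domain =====

-- B removes the required drugs from a copy of drugList and derives the pdc list from the
-- final result in one pass, instead of A's up-front pdc list with a parallel per-iteration remove (objective: simpler).


-- shared helper: "'_'.join(i.split('_')[:-3]) + '_pdc_' + '_'.join(i.split('_')[-3:])"
-- (exact: PySem.Chars.splitOn/join on code points, List.slice for the negative-bound slices)
def pdcName (s : String) : String :=
  let parts := PySem.Chars.splitOn s.toList ['_']
  String.ofList (PySem.Chars.join ['_'] (PySem.List.slice parts none (some (-3))) ++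
    "_pdc_".toList ++ PySem.Chars.join ['_'] (PySem.List.slice parts (some (-3)) none))

-- ===== PORT A =====
def antiDiabeticListUpdate (drugList : List String) (requiredDrug : List String) : List String × List String :=
  -- drugPDCList = []; for i in drugListCopy: drugPDCList.append(pdc)
  let drugListCopy := drugList
  let drugPDCList := drugListCopy.foldl (fun acc i => acc ++ [pdcName i]) ([] : List String)
  if requiredDrug.isEmpty then
    (drugListCopy, drugPDCList)
  else
    requiredDrug.foldl (fun st i =>
      match PySem.List.remove? st.1 i with
      | none => st                                   -- Python raises ValueError here (outside Pre_)
      | some l =>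
        match PySem.List.remove? st.2 (pdcName i) with
        | none => (l, st.2)                          -- Python raises ValueError here (outside Pre_)
        | some p => (l, p)) (drugListCopy, drugPDCList)

-- ===== PORT B =====
def antiDiabeticListUpdate_alt (drugList : List String) (requiredDrug : List String) : List String × List String :=
  let remaining := requiredDrug.foldl (fun l i =>
      match PySem.List.remove? l i with
      | none => l                                    -- Python raises ValueError here (outside Pre_)
      | some l' => l') drugList
  (remaining, remaining.map pdcName)

-- ===== PRECONDITION & SPEC =====
-- Pre_ excludes (a) the inputs on which A raises ValueError (some required drug occurs more often in
-- requiredDrug than in drugList), and (b) when removals happen, lists in which two DISTINCT drugs share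
-- the same derived pdc name: there A's by-value pdc .remove may delete the pdc entry of a different drug,
-- desynchronising the two returned lists — an accidental corner of the name collision, which B resolves
-- by keeping the pdc list aligned with the drug list.
def Pre_antiDiabeticListUpdate (drugList : List String) (requiredDrug : List String) : Prop :=
  (∀ x ∈ requiredDrug, requiredDrug.count x ≤ drugList.count x) ∧
  (requiredDrug = [] ∨ ∀ a ∈ drugList, ∀ b ∈ drugList, pdcName a = pdcName b → a = b)
instance (drugList : List String) (requiredDrug : List String) : Decidable (Pre_antiDiabeticListUpdate drugList requiredDrug) := by
  unfold Pre_antiDiabeticListUpdate; infer_instance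

def pvWitness_antiDiabeticListUpdate : List String × List String :=
  (["glp_1_x_y_z", "metformin_a_b_c"], ["metformin_a_b_c"])

def Spec_antiDiabeticListUpdate (drugList : List String) (requiredDrug : List String) (out : List String × List String) : Prop := out = antiDiabeticListUpdate_alt drugList requiredDrug
instance (drugList : List String) (requiredDrug : List String) (out : List String × List String) : Decidable (Spec_antiDiabeticListUpdate drugList requiredDrug out) := by unfold Spec_antiDiabeticListUpdate; infer_instance

-- ===== CLAIM (what is proved, stated in full; the proofs are below) =====
def Claim_equal_antiDiabeticListUpdate : Prop := ∀ (drugList : List String) (requiredDrug : List String), Dom_antiDiabeticListUpdate drugList requiredDrug → Pre_antiDiabeticListUpdate drugList requiredDrug → Spec_antiDiabeticListUpdate drugList requiredDrug (antiDiabeticListUpdate drugList requiredDrug)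

-- ===== LEMMAS AND PROOFS =====

theorem pvWitness_ok :
    Dom_antiDiabeticListUpdate pvWitness_antiDiabeticListUpdate.1 pvWitness_antiDiabeticListUpdate.2 ∧
    Pre_antiDiabeticListUpdate pvWitness_antiDiabeticListUpdate.1 pvWitness_antiDiabeticListUpdate.2 := by
  decide

-- erasing (pdcName i) from the mapped list matches mapping after erasing i,
-- provided no other element of l collides with i's pdc name
theorem erase_map_pdcName (l : List String) (i : String) (hi : i ∈ l)
    (hinj : ∀ a ∈ l, pdcName a = pdcName i → a = i) :
    (l.map pdcName).erase (pdcName i) = (l.erase i).map pdcName := by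
  induction l with
  | nil => cases hi
  | cons a t ih =>
    by_cases h : a = i
    · subst h
      simp [List.erase_cons_head]
    · have hne : pdcName a ≠ pdcName i := fun hc => h (hinj a (List.mem_cons_self) hc)
      have hit : i ∈ t := by
        rcases List.mem_cons.mp hi with rfl | hit
        · exact absurd rfl h
        · exact hit
      simp only [List.map_cons, List.erase_cons, beq_iff_eq, if_neg hne, if_neg h]
      rw [ih hit (fun b hb hc => hinj b (List.mem_cons_of_mem a hb) hc)]

-- the removal loops of A and B run in lockstep: A's state stays (l, l.map pdcName)
theorem loop_lockstep (req : List String) :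
    ∀ (l : List String),
    (∀ a ∈ l, ∀ b ∈ l, pdcName a = pdcName b → a = b) →
    (∀ x ∈ req, req.count x ≤ l.count x) →
    req.foldl (fun st i =>
      match PySem.List.remove? st.1 i with
      | none => st
      | some l =>
        match PySem.List.remove? st.2 (pdcName i) with
        | none => (l, st.2)
        | some p => (l, p)) (l, l.map pdcName)
    = (req.foldl (fun l i =>
        match PySem.List.remove? l i with
        | none => l
        | some l' => l') l,
       (req.foldl (fun l i =>
        match PySem.List.remove? l i with
        | none => l
        | some l' => l') l).map pdcName) := by
  induction req with
  | nil => intro l _ _; rfl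
  | cons i rest ih =>
    intro l hinj hcnt
    have hi : i ∈ l := by
      have h1 := hcnt i List.mem_cons_self
      rw [List.count_cons_self] at h1
      exact List.count_pos_iff.mp (by omega)
    have h1 : PySem.List.remove? l i = some (l.erase i) :=
      PySem.List.remove?_eq_some_erase l i hi
    have hpi : pdcName i ∈ l.map pdcName := List.mem_map_of_mem hi
    have h2 : PySem.List.remove? (l.map pdcName) (pdcName i) = some ((l.erase i).map pdcName) := by
      rw [PySem.List.remove?_eq_some_erase (l.map pdcName) (pdcName i) hpi,
        erase_map_pdcName l i hi (fun a ha hc => hinj a ha i hi hc)]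
    simp only [List.foldl_cons, h1, h2]
    exact ih (l.erase i)
      (fun a ha b hb => hinj a (List.mem_of_mem_erase ha) b (List.mem_of_mem_erase hb))
      (fun x hx => by
        have hc := hcnt x (List.mem_cons_of_mem i hx)
        rw [List.count_erase]
        rw [List.count_cons] at hc
        by_cases hxi : i = x <;> simp [hxi] at hc ⊢ <;> omega)

-- ===== VERDICT (by name: the statement is the Claim_ definition above) =====
theorem antiDiabeticListUpdate_spec : Claim_equal_antiDiabeticListUpdate := by
  intro drugList requiredDrug _ hpre
  unfold Spec_antiDiabeticListUpdate antiDiabeticListUpdate antiDiabeticListUpdate_alt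
  obtain ⟨hcnt, hinj⟩ := hpre
  simp only [PySem.List.foldl_append_singleton_eq_map]
  cases requiredDrug with
  | nil => simp
  | cons i rest =>
    simp only [List.isEmpty_cons, Bool.false_eq_true, reduceIte]
    have hinj' : ∀ a ∈ drugList, ∀ b ∈ drugList, pdcName a = pdcName b → a = b := by
      rcases hinj with h | h
      · exact absurd h (by simp)
      · exact h
    exact loop_lockstep (i :: rest) drugList hinj' hcnt
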